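-- pv_equiv track=rewrite | github.com/daniyal1249/Advent-of-Code-2024 | Day 3/day3.py | parse_tuple
-- ===== SOURCE A (Python) =====
-- def parse_tuple(string):
--     string = string[1:-1]
--     nums = string.split(',')
--     if len(nums) != 2:
--         return 0, 0
--
--     digits = '0123456789'
--     for num in nums:
--         if not 0 < len(num) < 4:
--             return 0, 0
--         if not all([char in digits for char in num]):
--             return 0, 0
--
--     return int(nums[0]), int(nums[1])
-- ===== SOURCE B (Python) =====
-- def parse_tuple(string):
--     rest = string[1:-1]
--     a = 0
--     k = 0
--     while rest and k < 3 and '0' <= rest[0] <= '9':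
--         a = a * 10 + (ord(rest[0]) - 48)
--         k += 1
--         rest = rest[1:]
--     if k == 0 or not rest.startswith(','):
--         return 0, 0
--     rest = rest[1:]
--     b = 0
--     j = 0
--     while rest and j < 3 and '0' <= rest[0] <= '9':
--         b = b * 10 + (ord(rest[0]) - 48)
--         j += 1
--         rest = rest[1:]
--     if j == 0 or rest:
--         return 0, 0
--     return a, b
-- ===== Notes on version B (the rewrite author's own statement) =====
-- stated objective: alternative
-- what changed: Replaces slice+split(',')+per-part length/digit checks+int() with a single left-to-right scanner over the inner string that consumes up to 3 digits, one comma, up to 3 digits, accumulating the two values arithmetically and rejecting if the scan does not span the whole string.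
import Mathlib
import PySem

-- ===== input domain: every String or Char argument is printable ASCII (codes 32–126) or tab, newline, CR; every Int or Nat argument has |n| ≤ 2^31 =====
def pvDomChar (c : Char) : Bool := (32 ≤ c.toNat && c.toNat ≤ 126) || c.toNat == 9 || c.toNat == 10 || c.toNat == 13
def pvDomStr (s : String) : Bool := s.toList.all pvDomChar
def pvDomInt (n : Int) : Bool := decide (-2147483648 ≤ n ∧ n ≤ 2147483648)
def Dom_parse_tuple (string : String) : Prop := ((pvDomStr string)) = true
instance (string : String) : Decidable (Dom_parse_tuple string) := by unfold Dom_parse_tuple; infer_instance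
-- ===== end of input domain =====

-- B replaces slice+split(',')+per-part checks+int() with a single left-to-right digit scanner
-- that accumulates the two values arithmetically (objective: alternative, same cost).

-- ===== PORT A =====
-- digits = '0123456789'
def pvDigitsA : List Char := "0123456789".toList

-- body of A's for-loop for one num: 0 < len(num) < 4 and all chars in digits
-- ('char in digits' for a 1-char char is substring membership, PySem.Chars.isIn)
def pvCheckA (num : List Char) : Bool :=
  (decide (0 < num.length) && decide (num.length < 4)) &&
    num.all (fun c => PySem.Chars.isIn [c] pvDigitsA)

-- A's for-loop with its early 'return 0, 0': true iff no check fails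
def pvLoopA : List (List Char) → Bool
  | [] => true
  | n :: rest => pvCheckA n && pvLoopA rest

def parse_tuple (string : String) : Int × Int :=
  let s := (PySem.Str.slice string (some 1) (some (-1))).toList
  let nums := PySem.Chars.splitOn s [',']
  if nums.length ≠ 2 then (0, 0)
  else if pvLoopA nums then
    -- int(nums[0]), int(nums[1]); the checks guarantee ofChars? is some, so getD 0 is unreachable
    ((PySem.Int.ofChars? (nums.getD 0 [])).getD 0,
     (PySem.Int.ofChars? (nums.getD 1 [])).getD 0)
  else (0, 0)

-- ===== PORT B =====
-- '0' <= c <= '9'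
def pvDig (c : Char) : Bool := decide ('0' ≤ c) && decide (c ≤ '9')

-- B's while loop: consume leading digits of rest (at most 3 in total), accumulating acc
def pvScan : List Char → Nat → Int → Int × Nat × List Char
  | [], k, acc => (acc, k, [])
  | c :: cs, k, acc =>
    if k < 3 && pvDig c then pvScan cs (k + 1) (acc * 10 + ((c.toNat : Int) - 48))
    else (acc, k, c :: cs)

def parse_tuple_alt (string : String) : Int × Int :=
  let inner := (PySem.Str.slice string (some 1) (some (-1))).toList
  let r1 := pvScan inner 0 0
  if r1.2.1 = 0 || !(PySem.Chars.startswith r1.2.2 [',']) then (0, 0)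
  else
    let r2 := pvScan (PySem.List.slice r1.2.2 (some 1) none) 0 0
    if r2.2.1 = 0 || !r2.2.2.isEmpty then (0, 0) else (r1.1, r2.1)

-- ===== PRECONDITION & SPEC =====
def Spec_parse_tuple (string : String) (out : Int × Int) : Prop := out = parse_tuple_alt string
instance (string : String) (out : Int × Int) : Decidable (Spec_parse_tuple string out) := by unfold Spec_parse_tuple; infer_instance

-- ===== CLAIM (what is proved, stated in full; the proofs are below) =====
def Claim_equal_parse_tuple : Prop := ∀ (string : String), Dom_parse_tuple string → Spec_parse_tuple string (parse_tuple string)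

-- ===== LEMMAS AND PROOFS =====

-- simple comma-splitter equal to PySem.Chars.splitOn · [','], convenient for induction
def pvSplit : List Char → List Char → List (List Char)
  | [], cur => [cur.reverse]
  | c :: rest, cur => if c = ',' then cur.reverse :: pvSplit rest [] else pvSplit rest (c :: cur)

def pvVal (acc : Int) (ds : List Char) : Int :=
  ds.foldl (fun a c => a * 10 + ((c.toNat : Int) - 48)) acc

theorem go_spec : ∀ (fuel : Nat) (l cur : List Char) (acc : List (List Char)), l.length < fuel →
    PySem.Chars.splitOn.go [','] fuel l cur acc = acc.reverse ++ pvSplit l cur := by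
  intro fuel
  induction fuel with
  | zero => intro l cur acc h; omega
  | succ f ih =>
    intro l cur acc h
    cases l with
    | nil => simp [PySem.Chars.splitOn.go, pvSplit]
    | cons c rest =>
      simp only [PySem.Chars.splitOn.go]
      by_cases hc : c = ','
      · subst hc
        simp only [List.isPrefixOf, List.length] at *
        simp [ih rest [] _ (by simp at h; omega), pvSplit]
      · have hcc : [','].isPrefixOf (c :: rest) = false := by
          simp [List.isPrefixOf]; exact fun h' => absurd h'.symm hc
        rw [hcc]
        simp only [Bool.false_eq_true, if_false]
        simp at h
        rw [ih rest (c :: cur) acc (by omega)]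
        simp [pvSplit, hc]

theorem splitOn_eq (cs : List Char) : PySem.Chars.splitOn cs [','] = pvSplit cs [] := by
  unfold PySem.Chars.splitOn
  rw [go_spec (cs.length + 1) cs [] [] (by omega)]
  simp

theorem pvSplit_len : ∀ (l cur : List Char), (pvSplit l cur).length = l.count ',' + 1 := by
  intro l
  induction l with
  | nil => intro cur; simp [pvSplit]
  | cons c rest ih =>
    intro cur
    by_cases hc : c = ','
    · subst hc; simp [pvSplit, ih, List.count_cons]
    · simp [pvSplit, hc, ih, List.count_cons, Ne.symm hc]

theorem pvSplit_nocomma : ∀ (l cur : List Char), ',' ∉ l → pvSplit l cur = [cur.reverse ++ l] := by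
  intro l
  induction l with
  | nil => intro cur _; simp [pvSplit]
  | cons c rest ih =>
    intro cur h
    have hc : c ≠ ',' := fun hc => h (hc ▸ List.mem_cons_self)
    simp only [pvSplit, if_neg hc]
    rw [ih (c :: cur) (fun hm => h (List.mem_cons_of_mem _ hm))]
    simp

theorem pvSplit_comma : ∀ (xs : List Char) (ys cur : List Char), ',' ∉ xs →
    pvSplit (xs ++ ',' :: ys) cur = (cur.reverse ++ xs) :: pvSplit ys [] := by
  intro xs
  induction xs with
  | nil => intro ys cur _; simp [pvSplit]
  | cons c rest ih =>
    intro ys cur h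
    have hc : c ≠ ',' := fun hc => h (hc ▸ List.mem_cons_self)
    simp only [List.cons_append, pvSplit, if_neg hc]
    rw [ih ys (c :: cur) (fun hm => h (List.mem_cons_of_mem _ hm))]
    simp

theorem exists_split : ∀ (cs : List Char), ',' ∈ cs →
    ∃ xs ys, cs = xs ++ ',' :: ys ∧ ',' ∉ xs := by
  intro cs
  induction cs with
  | nil => intro h; cases h
  | cons c rest ih =>
    intro h
    by_cases hc : c = ','
    · exact ⟨[], rest, by simp [hc], by simp⟩
    · have hm : ',' ∈ rest := by
        rcases List.mem_cons.mp h with h' | h'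
        · exact absurd h'.symm hc
        · exact h'
      obtain ⟨xs, ys, rfl, hxs⟩ := ih hm
      refine ⟨c :: xs, ys, by simp, ?_⟩
      intro hmm
      rcases List.mem_cons.mp hmm with h' | h'
      · exact hc h'.symm
      · exact hxs h'

theorem scan_spec : ∀ (l : List Char) (k : Nat) (acc : Int),
    pvScan l k acc = (pvVal acc ((l.takeWhile pvDig).take (3 - k)),
      k + ((l.takeWhile pvDig).take (3 - k)).length,
      l.drop ((l.takeWhile pvDig).take (3 - k)).length) := by
  intro l
  induction l with
  | nil => intro k acc; simp [pvScan, pvVal]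
  | cons c cs ih =>
    intro k acc
    by_cases hk : k < 3
    · by_cases hd : pvDig c = true
      · have h3 : 3 - k = (3 - (k + 1)) + 1 := by omega
        simp only [pvScan]
        rw [if_pos (show (decide (k < 3) && pvDig c) = true by simp [hk, hd])]
        rw [ih (k + 1)]
        rw [List.takeWhile_cons, if_pos hd, h3, List.take_succ_cons]
        refine Prod.ext ?_ (Prod.ext ?_ ?_) <;> simp [pvVal] <;> omega
      · simp only [pvScan]
        rw [if_neg (by simp [hd])]
        rw [List.takeWhile_cons, if_neg hd]
        simp [pvVal]
    · have h3 : 3 - k = 0 := by omega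
      simp only [pvScan]
      rw [if_neg (by simp [hk]), h3]
      simp [pvVal]

theorem tw_all {p : Char → Bool} : ∀ (xs l : List Char), xs.all p = true →
    (xs ++ l).takeWhile p = xs ++ l.takeWhile p := by
  intro xs
  induction xs with
  | nil => intro l _; simp
  | cons c rest ih =>
    intro l h
    simp only [List.all_cons, Bool.and_eq_true] at h
    simp [List.takeWhile_cons, h.1, ih l h.2]

theorem tw_stop {p : Char → Bool} : ∀ (xs l : List Char), xs.all p = false →
    (xs ++ l).takeWhile p = xs.takeWhile p := by
  intro xs
  induction xs with
  | nil => intro l h; simp at h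
  | cons c rest ih =>
    intro l h
    simp only [List.all_cons, Bool.and_eq_false_iff] at h
    rcases h with h | h
    · simp [List.takeWhile_cons, h]
    · by_cases hc : p c = true
      · simp [List.takeWhile_cons, hc, ih l h]
      · simp [List.takeWhile_cons, hc]

theorem tw_len_lt {p : Char → Bool} : ∀ (xs : List Char), xs.all p = false →
    (xs.takeWhile p).length < xs.length := by
  intro xs
  induction xs with
  | nil => intro h; simp at h
  | cons c rest ih =>
    intro h
    simp only [List.all_cons, Bool.and_eq_false_iff] at h
    rcases h with h | h
    · simp [List.takeWhile_cons, h]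
    · by_cases hc : p c = true
      · simp only [List.takeWhile_cons, if_pos hc, List.length_cons]
        exact Nat.succ_lt_succ (ih h)
      · simp [List.takeWhile_cons, hc]

theorem pvDig_cases {c : Char} (h : pvDig c = true) :
    c = '0' ∨ c = '1' ∨ c = '2' ∨ c = '3' ∨ c = '4' ∨
    c = '5' ∨ c = '6' ∨ c = '7' ∨ c = '8' ∨ c = '9' := by
  simp only [pvDig, Bool.and_eq_true, decide_eq_true_eq] at h
  have h1 : 48 ≤ c.toNat := UInt32.le_iff_toNat_le.mp (Char.le_def.mp h.1)
  have h2 : c.toNat ≤ 57 := UInt32.le_iff_toNat_le.mp (Char.le_def.mp h.2)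
  have hc := Char.ofNat_toNat c
  interval_cases hn : c.toNat <;> rw [← hc] <;> decide

theorem ofChars_digits : ∀ (ds : List Char), ds ≠ [] → ds.length ≤ 3 → ds.all pvDig = true →
    PySem.Int.ofChars? ds = some (pvVal 0 ds) := by
  intro ds h0 h3 hd
  match ds, h0 with
  | [a], _ =>
    simp only [List.all_cons, List.all_nil, Bool.and_true] at hd
    rcases pvDig_cases hd with rfl|rfl|rfl|rfl|rfl|rfl|rfl|rfl|rfl|rfl <;> decide
  | [a, b], _ =>
    simp only [List.all_cons, List.all_nil, Bool.and_true, Bool.and_eq_true] at hd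
    rcases pvDig_cases hd.1 with rfl|rfl|rfl|rfl|rfl|rfl|rfl|rfl|rfl|rfl <;>
      rcases pvDig_cases hd.2 with rfl|rfl|rfl|rfl|rfl|rfl|rfl|rfl|rfl|rfl <;> decide
  | [a, b, c], _ =>
    simp only [List.all_cons, List.all_nil, Bool.and_true, Bool.and_eq_true] at hd
    rcases pvDig_cases hd.1 with rfl|rfl|rfl|rfl|rfl|rfl|rfl|rfl|rfl|rfl <;>
      rcases pvDig_cases hd.2.1 with rfl|rfl|rfl|rfl|rfl|rfl|rfl|rfl|rfl|rfl <;>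
        rcases pvDig_cases hd.2.2 with rfl|rfl|rfl|rfl|rfl|rfl|rfl|rfl|rfl|rfl <;> decide
  | a :: b :: c :: d :: t, _ => simp only [List.length_cons] at h3; omega

theorem isIn_digits (c : Char) : PySem.Chars.isIn [c] pvDigitsA = pvDig c := by
  by_cases h : pvDig c = true
  · rw [h]
    rcases pvDig_cases h with rfl|rfl|rfl|rfl|rfl|rfl|rfl|rfl|rfl|rfl <;> decide
  · rw [Bool.not_eq_true] at h
    rw [h, PySem.Chars.isIn_eq_false_iff]
    intro hinf
    have hmem : c ∈ ['0','1','2','3','4','5','6','7','8','9'] := by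
      have : c ∈ pvDigitsA := hinf.subset (by simp)
      simpa [pvDigitsA] using this
    have : pvDig c = true := by fin_cases hmem <;> decide
    rw [this] at h; exact absurd h (by simp)

theorem sw_comma (t : List Char) : PySem.Chars.startswith (',' :: t) [','] = true := by
  rw [PySem.Chars.startswith_iff]; exact ⟨t, rfl⟩

theorem sw_not (d : Char) (t : List Char) (h : d ≠ ',') :
    PySem.Chars.startswith (d :: t) [','] = false := by
  rw [← Bool.not_eq_true, PySem.Chars.startswith_iff]
  intro hp
  exact h (List.cons_prefix_cons.mp hp).1.symm

theorem sw_nil : PySem.Chars.startswith ([] : List Char) [','] = false := by decide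

-- scan over a fully-digit prefix followed by the comma
theorem scan_good (xs ys : List Char) (hxd : xs.all pvDig = true) (hxl : xs.length ≤ 3) :
    pvScan (xs ++ ',' :: ys) 0 0 = (pvVal 0 xs, xs.length, ',' :: ys) := by
  rw [scan_spec]
  have htw : (xs ++ ',' :: ys).takeWhile pvDig = xs := by
    rw [tw_all _ _ hxd, List.takeWhile_cons, if_neg (by decide)]
    simp
  rw [htw, Nat.sub_zero, List.take_of_length_le hxl]
  have hdl := List.drop_left (l₁ := xs) (l₂ := ',' :: ys)
  rw [hdl]
  simp

-- scan over a fully-digit list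
theorem scan_full (l : List Char) (hd : l.all pvDig = true) (hl : l.length ≤ 3) :
    pvScan l 0 0 = (pvVal 0 l, l.length, []) := by
  rw [scan_spec]
  have htw : l.takeWhile pvDig = l := by
    have := tw_all l [] hd; simpa using this
  rw [htw, Nat.sub_zero, List.take_of_length_le hl]
  simp

-- scan stuck inside a bad comma-free prefix: the remainder starts with a non-comma char
theorem scan_stuck (xs ys : List Char) (hxs : ',' ∉ xs)
    (hx : ¬(xs.all pvDig = true ∧ xs.length ≤ 3)) :
    ∃ d t, (pvScan (xs ++ ',' :: ys) 0 0).2.2 = d :: t ∧ d ≠ ',' := by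
  rw [scan_spec]
  have hm : (((xs ++ ',' :: ys).takeWhile pvDig).take (3 - 0)).length < xs.length := by
    by_cases ha : xs.all pvDig = true
    · have hxl : 3 < xs.length := by
        rcases not_and_or.mp hx with h | h
        · exact absurd ha h
        · omega
      rw [tw_all _ _ ha, List.takeWhile_cons, if_neg (by decide)]
      simp only [List.append_nil, Nat.sub_zero, List.length_take]
      omega
    · have ha' : xs.all pvDig = false := by
        rw [← Bool.not_eq_true]; exact ha
      rw [tw_stop _ _ ha']
      have := tw_len_lt xs ha'
      simp only [Nat.sub_zero, List.length_take]
      omega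
  set m := (((xs ++ ',' :: ys).takeWhile pvDig).take (3 - 0)).length with hmdef
  rw [List.drop_append_of_le_length (Nat.le_of_lt hm)]
  cases hdd : xs.drop m with
  | nil => rw [List.drop_eq_nil_iff] at hdd; omega
  | cons d t =>
    refine ⟨d, t ++ ',' :: ys, by simp, ?_⟩
    have : d ∈ xs := List.mem_of_mem_drop (hdd ▸ List.mem_cons_self)
    exact fun h => hxs (h ▸ this)

-- scan of a list that is not entirely ≤3 digits leaves a nonempty remainder
theorem scan_rem_ne (l : List Char) (hy : ¬(l.all pvDig = true ∧ l.length ≤ 3)) :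
    (pvScan l 0 0).2.2 ≠ [] := by
  rw [scan_spec]
  simp only [ne_eq, List.drop_eq_nil_iff, not_le]
  by_cases ha : l.all pvDig = true
  · have hl : 3 < l.length := by
      rcases not_and_or.mp hy with h | h
      · exact absurd ha h
      · omega
    have htw : l.takeWhile pvDig = l := by
      have := tw_all l [] ha; simpa using this
    rw [htw]
    simp only [Nat.sub_zero, List.length_take]
    omega
  · have ha' : l.all pvDig = false := by rw [← Bool.not_eq_true]; exact ha
    have := tw_len_lt l ha'
    simp only [Nat.sub_zero, List.length_take]
    omega

-- the comma survives the scan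
theorem scan_rem_comma (l : List Char) (hc : ',' ∈ l) : ',' ∈ (pvScan l 0 0).2.2 := by
  rw [scan_spec]
  simp only
  have hpre : (l.takeWhile pvDig).take (3 - 0) <+: l :=
    (List.take_prefix _ _).trans (List.takeWhile_prefix _)
  obtain ⟨t, ht⟩ := hpre
  have hdl := List.drop_left (l₁ := (l.takeWhile pvDig).take (3 - 0)) (l₂ := t)
  rw [ht] at hdl
  rw [hdl]
  rw [← ht] at hc
  rcases List.mem_append.mp hc with h | h
  · exact absurd (List.mem_takeWhile_imp (List.mem_of_mem_take h)) (by decide)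
  · exact h

-- no comma at all: the remainder cannot start with one
theorem scan_no_comma (l : List Char) (hn : ',' ∉ l) :
    PySem.Chars.startswith (pvScan l 0 0).2.2 [','] = false := by
  rw [scan_spec]
  simp only
  cases hdd : l.drop ((l.takeWhile pvDig).take (3 - 0)).length with
  | nil => exact sw_nil
  | cons d t =>
    refine sw_not d t ?_
    have : d ∈ l := List.mem_of_mem_drop (hdd ▸ List.mem_cons_self)
    exact fun h => hn (h ▸ this)

-- the A-side all-chars-in-digits test is the digit test
theorem all_isIn (l : List Char) :
    (l.all fun c => PySem.Chars.isIn [c] pvDigitsA) = l.all pvDig := by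
  simp [isIn_digits]

theorem checkA_false (l : List Char) (h : ¬(l.all pvDig = true ∧ l.length ≤ 3)) :
    pvCheckA l = false := by
  rcases not_and_or.mp h with h | h
  · have h' : l.all pvDig = false := by rw [← Bool.not_eq_true]; exact h
    simp [pvCheckA, all_isIn, h']
  · have h' : ¬ l.length < 4 := by omega
    simp [pvCheckA, h']

theorem checkA_true (l : List Char) (h1 : l.all pvDig = true) (h2 : l.length ≠ 0)
    (h3 : l.length ≤ 3) : pvCheckA l = true := by
  simp only [pvCheckA, all_isIn, h1, Bool.and_true]
  simp only [Bool.and_eq_true, decide_eq_true_eq]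
  omega

theorem core (cs : List Char) :
    (if (pvSplit cs []).length ≠ 2 then ((0 : Int), (0 : Int))
     else if pvLoopA (pvSplit cs []) then
       ((PySem.Int.ofChars? ((pvSplit cs []).getD 0 [])).getD 0,
        (PySem.Int.ofChars? ((pvSplit cs []).getD 1 [])).getD 0)
     else (0, 0))
    = (if (pvScan cs 0 0).2.1 = 0 || !(PySem.Chars.startswith (pvScan cs 0 0).2.2 [',']) then (0, 0)
       else if (pvScan (PySem.List.slice (pvScan cs 0 0).2.2 (some 1) none) 0 0).2.1 = 0 ||
               !((pvScan (PySem.List.slice (pvScan cs 0 0).2.2 (some 1) none) 0 0).2.2.isEmpty)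
            then (0, 0)
       else ((pvScan cs 0 0).1,
             (pvScan (PySem.List.slice (pvScan cs 0 0).2.2 (some 1) none) 0 0).1)) := by
  by_cases h1 : cs.count ',' = 1
  · have hmem : ',' ∈ cs := List.count_pos_iff.mp (by omega)
    obtain ⟨xs, ys, rfl, hxs⟩ := exists_split cs hmem
    have hxc : xs.count ',' = 0 := List.count_eq_zero.mpr hxs
    have hys : ',' ∉ ys := by
      rw [List.count_append, List.count_cons_self, hxc] at h1
      exact List.count_eq_zero.mp (by omega)
    have hsplit : pvSplit (xs ++ ',' :: ys) [] = [xs, ys] := by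
      rw [pvSplit_comma xs ys [] hxs, pvSplit_nocomma ys [] hys]; simp
    rw [hsplit]
    rw [if_neg (by simp)]
    by_cases hx : xs.all pvDig = true ∧ xs.length ≤ 3
    · obtain ⟨hxd, hxl⟩ := hx
      rw [scan_good xs ys hxd hxl]
      by_cases hx0 : xs.length = 0
      · obtain rfl := List.length_eq_zero_iff.mp hx0
        simp [pvLoopA, pvCheckA]
      · rw [show PySem.List.slice (',' :: ys) (some 1) none = ys from by
          rw [PySem.List.slice_from_one]; rfl]
        by_cases hy : ys.all pvDig = true ∧ ys.length ≤ 3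
        · obtain ⟨hyd, hyl⟩ := hy
          rw [scan_full ys hyd hyl]
          by_cases hy0 : ys.length = 0
          · obtain rfl := List.length_eq_zero_iff.mp hy0
            simp [pvLoopA, pvCheckA, hx0, sw_comma]
          · have hLA : pvLoopA [xs, ys] = true := by
              simp [pvLoopA, checkA_true xs hxd hx0 hxl, checkA_true ys hyd hy0 hyl]
            have hvx := ofChars_digits xs (fun h => hx0 (by simp [h])) hxl hxd
            have hvy := ofChars_digits ys (fun h => hy0 (by simp [h])) hyl hyd
            simp [hLA, hvx, hvy, hx0, hy0, sw_comma]
        · have hLA : pvLoopA [xs, ys] = false := by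
            simp [pvLoopA, checkA_false ys hy]
          have hne := scan_rem_ne ys hy
          simp [hLA, hx0, sw_comma, hne]
    · have hLA : pvLoopA [xs, ys] = false := by
        simp [pvLoopA, checkA_false xs hx]
      obtain ⟨d, t, hdt, hd⟩ := scan_stuck xs ys hxs hx
      rw [hdt, sw_not d t hd]
      simp [hLA]
  · rw [if_pos (by rw [pvSplit_len]; omega)]
    by_cases h0 : cs.count ',' = 0
    · have hn : ',' ∉ cs := List.count_eq_zero.mp h0
      rw [scan_no_comma cs hn]
      simp
    · have hmem : ',' ∈ cs := List.count_pos_iff.mp (by omega)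
      obtain ⟨xs, ys, rfl, hxs⟩ := exists_split cs hmem
      have hxc : xs.count ',' = 0 := List.count_eq_zero.mpr hxs
      have hysc : ',' ∈ ys := by
        rw [List.count_append, List.count_cons_self, hxc] at h1
        exact List.count_pos_iff.mp (by omega)
      by_cases hx : xs.all pvDig = true ∧ xs.length ≤ 3
      · obtain ⟨hxd, hxl⟩ := hx
        rw [scan_good xs ys hxd hxl]
        by_cases hx0 : xs.length = 0
        · simp [hx0]
        · rw [show PySem.List.slice (',' :: ys) (some 1) none = ys from by
            rw [PySem.List.slice_from_one]; rfl]
          have hne : (pvScan ys 0 0).2.2 ≠ [] := List.ne_nil_of_mem (scan_rem_comma ys hysc)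
          simp [hx0, sw_comma, hne]
      · obtain ⟨d, t, hdt, hd⟩ := scan_stuck xs ys hxs hx
        rw [hdt, sw_not d t hd]
        simp

-- ===== VERDICT (by name: the statement is the Claim_ definition above) =====
theorem parse_tuple_spec : Claim_equal_parse_tuple := by
  intro s _
  unfold Spec_parse_tuple parse_tuple parse_tuple_alt
  simp only [splitOn_eq]
  exact core _
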